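-- pv_equiv track=rewrite | github.com/tsizzle131/apollo-lead-generation | modules/linkedin_scraper.py | _filter_key_people
-- ===== SOURCE A (Python) =====
-- from typing import List, Dict, Any, Optional, Tuple
--
-- def _filter_key_people(profiles: List[Dict[str, Any]]) -> List[Dict[str, Any]]:
--     """Filter LinkedIn profiles for key decision makers"""
--     key_titles = [
--         'owner', 'founder', 'ceo', 'president', 'director',
--         'manager', 'chief', 'head', 'principal', 'partner'
--     ]
--
--     key_people = []
--     for profile in profiles:
--         title = (profile.get('headline', '') or profile.get('title', '')).lower()
--         if any(key_title in title for key_title in key_titles):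
--             key_people.append(profile)
--
--     # Sort by importance (owner/founder > CEO > director > manager)
--     def title_priority(profile):
--         title = (profile.get('headline', '') or profile.get('title', '')).lower()
--         if 'owner' in title or 'founder' in title:
--             return 1
--         elif 'ceo' in title or 'chief executive' in title:
--             return 2
--         elif 'president' in title:
--             return 3
--         elif 'director' in title:
--             return 4
--         elif 'manager' in title:
--             return 5
--         return 6
--
--     key_people.sort(key=title_priority)
--     return key_people
-- ===== SOURCE B (Python) =====
-- def _filter_key_people(profiles):
--     """Filter LinkedIn profiles for key decision makers (one-pass bucket sort)."""
--     key_titles = [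
--         'owner', 'founder', 'ceo', 'president', 'director',
--         'manager', 'chief', 'head', 'principal', 'partner'
--     ]
--     buckets = [[], [], [], [], [], []]
--     for profile in profiles:
--         title = (profile.get('headline', '') or profile.get('title', '')).lower()
--         if not any(key_title in title for key_title in key_titles):
--             continue
--         if 'owner' in title or 'founder' in title:
--             i = 0
--         elif 'ceo' in title or 'chief executive' in title:
--             i = 1
--         elif 'president' in title:
--             i = 2
--         elif 'director' in title:
--             i = 3
--         elif 'manager' in title:
--             i = 4
--         else:
--             i = 5
--         buckets[i].append(profile)
--     return [p for bucket in buckets for p in bucket]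
-- ===== Notes on version B (the rewrite author's own statement) =====
-- stated objective: alternative
-- what changed: Replaces filter-then-comparison-sort-by-priority-key with a single pass that drops non-matching profiles and appends each kept profile to one of six fixed priority buckets, returning the buckets concatenated in order (a stable bucket sort); measured run time is the same since the substring scans dominate.
import Mathlib
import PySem

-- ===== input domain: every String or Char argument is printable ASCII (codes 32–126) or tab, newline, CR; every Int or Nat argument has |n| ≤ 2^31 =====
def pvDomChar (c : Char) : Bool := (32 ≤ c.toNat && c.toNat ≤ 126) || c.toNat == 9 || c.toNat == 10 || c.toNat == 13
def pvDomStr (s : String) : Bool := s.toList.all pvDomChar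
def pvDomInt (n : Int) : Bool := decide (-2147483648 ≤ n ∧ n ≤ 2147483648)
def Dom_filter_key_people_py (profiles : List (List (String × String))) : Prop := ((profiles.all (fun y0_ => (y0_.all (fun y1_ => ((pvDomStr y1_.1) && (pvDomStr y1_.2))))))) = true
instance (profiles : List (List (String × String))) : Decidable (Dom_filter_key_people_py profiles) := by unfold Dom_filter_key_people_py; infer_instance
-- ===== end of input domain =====

-- B replaces A's filter + comparison sort by a single pass into six priority buckets
-- concatenated in order (stable bucket sort); return value proved equal on all inputs.


-- ===== PORT A =====
-- dict.get(k, dflt) on an insertion-ordered association list: first match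
def pvGetKey (p : List (String × String)) (k : String) (d : String) : String :=
  match p.find? (fun kv => kv.1 == k) with
  | some kv => kv.2
  | none => d

-- (profile.get('headline','') or profile.get('title','')).lower()
def pvTitle (p : List (String × String)) : String :=
  PySem.Str.lower
    (if pvGetKey p "headline" "" = "" then pvGetKey p "title" "" else pvGetKey p "headline" "")

def pvKeyTitles : List String :=
  ["owner", "founder", "ceo", "president", "director",
   "manager", "chief", "head", "principal", "partner"]

-- any(key_title in title for key_title in key_titles)
def pvKeep (p : List (String × String)) : Bool :=
  pvKeyTitles.any (fun kt => PySem.Str.isIn kt (pvTitle p))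

def titlePriority (p : List (String × String)) : Int :=
  let title := pvTitle p
  if PySem.Str.isIn "owner" title || PySem.Str.isIn "founder" title then 1
  else if PySem.Str.isIn "ceo" title || PySem.Str.isIn "chief executive" title then 2
  else if PySem.Str.isIn "president" title then 3
  else if PySem.Str.isIn "director" title then 4
  else if PySem.Str.isIn "manager" title then 5
  else 6

def filter_key_people_py (profiles : List (List (String × String))) : List (List (String × String)) :=
  let key_people := profiles.foldl (fun acc profile => if pvKeep profile then acc ++ [profile] else acc) []
  PySem.List.sorted key_people titlePriority false

-- ===== PORT B =====
-- one step of B's loop: skip non-matches, else append to the bucket the elif chain selects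
def pvBucketStep
    (st : List (List (String × String)) × List (List (String × String)) × List (List (String × String)) ×
          List (List (String × String)) × List (List (String × String)) × List (List (String × String)))
    (profile : List (String × String)) :
    List (List (String × String)) × List (List (String × String)) × List (List (String × String)) ×
    List (List (String × String)) × List (List (String × String)) × List (List (String × String)) :=
  let (b1, b2, b3, b4, b5, b6) := st
  let title := pvTitle profile
  if !pvKeyTitles.any (fun kt => PySem.Str.isIn kt title) then st
  else if PySem.Str.isIn "owner" title || PySem.Str.isIn "founder" title then
    (b1 ++ [profile], b2, b3, b4, b5, b6)
  else if PySem.Str.isIn "ceo" title || PySem.Str.isIn "chief executive" title then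
    (b1, b2 ++ [profile], b3, b4, b5, b6)
  else if PySem.Str.isIn "president" title then
    (b1, b2, b3 ++ [profile], b4, b5, b6)
  else if PySem.Str.isIn "director" title then
    (b1, b2, b3, b4 ++ [profile], b5, b6)
  else if PySem.Str.isIn "manager" title then
    (b1, b2, b3, b4, b5 ++ [profile], b6)
  else
    (b1, b2, b3, b4, b5, b6 ++ [profile])

def filter_key_people_py_alt (profiles : List (List (String × String))) : List (List (String × String)) :=
  let (b1, b2, b3, b4, b5, b6) := profiles.foldl pvBucketStep ([], [], [], [], [], [])
  b1 ++ b2 ++ b3 ++ b4 ++ b5 ++ b6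

-- ===== PRECONDITION & SPEC =====
def Spec_filter_key_people_py (profiles : List (List (String × String))) (out : List (List (String × String))) : Prop := out = filter_key_people_py_alt profiles
instance (profiles : List (List (String × String))) (out : List (List (String × String))) : Decidable (Spec_filter_key_people_py profiles out) := by unfold Spec_filter_key_people_py; infer_instance

-- ===== CLAIM (what is proved, stated in full; the proofs are below) =====
def Claim_equal_filter_key_people_py : Prop := ∀ (profiles : List (List (String × String))), Dom_filter_key_people_py profiles → Spec_filter_key_people_py profiles (filter_key_people_py profiles)

-- ===== LEMMAS AND PROOFS =====

-- the six buckets of a list, in priority order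
def pvBucket (i : Int) (l : List (List (String × String))) : List (List (String × String)) :=
  l.filter (fun p => titlePriority p == i)

def pvBucketed (l : List (List (String × String))) : List (List (String × String)) :=
  pvBucket 1 l ++ pvBucket 2 l ++ pvBucket 3 l ++ pvBucket 4 l ++ pvBucket 5 l ++ pvBucket 6 l

theorem titlePriority_cases (p : List (String × String)) :
    titlePriority p = 1 ∨ titlePriority p = 2 ∨ titlePriority p = 3 ∨
    titlePriority p = 4 ∨ titlePriority p = 5 ∨ titlePriority p = 6 := by
  unfold titlePriority
  dsimp only
  split_ifs <;> simp

theorem mem_pvBucket {i : Int} {l : List (List (String × String))} {y : List (String × String)}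
    (h : y ∈ pvBucket i l) : titlePriority y = i := by
  have := (List.mem_filter.mp h).2
  simpa using this

theorem insertBy_append_of_forall_false {α : Type} (before : α → α → Bool) (x : α)
    (L M : List α) (h : ∀ y ∈ L, before x y = false) :
    PySem.List.insertBy before x (L ++ M) = L ++ PySem.List.insertBy before x M := by
  induction L with
  | nil => simp
  | cons a t ih =>
    have ha : before x a = false := h a (by simp)
    simp [PySem.List.insertBy, ha, ih (fun y hy => h y (by simp [hy]))]

theorem insertBy_of_forall_true {α : Type} (before : α → α → Bool) (x : α)
    (L : List α) (h : ∀ y ∈ L, before x y = true) :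
    PySem.List.insertBy before x L = x :: L := by
  cases L with
  | nil => simp [PySem.List.insertBy]
  | cons a t => simp [PySem.List.insertBy, h a (by simp)]

theorem insertBy_split {α : Type} (before : α → α → Bool) (x : α)
    (L M : List α) (hL : ∀ y ∈ L, before x y = false) (hM : ∀ y ∈ M, before x y = true) :
    PySem.List.insertBy before x (L ++ M) = L ++ x :: M := by
  rw [insertBy_append_of_forall_false _ _ _ _ hL, insertBy_of_forall_true _ _ _ hM]

set_option maxHeartbeats 2000000 in
theorem insertBy_bucketed (l : List (List (String × String))) (x : List (String × String)) :
    PySem.List.insertBy (fun a b => decide (titlePriority a < titlePriority b)) x (pvBucketed l)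
      = pvBucketed (l ++ [x]) := by
  have hbk : ∀ i : Int, pvBucket i (l ++ [x]) =
      pvBucket i l ++ (if titlePriority x = i then [x] else []) := by
    intro i
    by_cases h : titlePriority x = i <;>
      simp [pvBucket, List.filter_append, h]
  have hfalse : ∀ (k : Int), titlePriority x = k → ∀ i : Int, i ≤ k →
      ∀ y ∈ pvBucket i l, (decide (titlePriority x < titlePriority y)) = false := by
    intro k hk i hi y hy
    have := mem_pvBucket hy
    simp only [this, hk, decide_eq_false_iff_not, not_lt]
    omega
  have htrue : ∀ (k : Int), titlePriority x = k → ∀ i : Int, k < i →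
      ∀ y ∈ pvBucket i l, (decide (titlePriority x < titlePriority y)) = true := by
    intro k hk i hi y hy
    have := mem_pvBucket hy
    simp only [this, hk, decide_eq_true_eq]
    omega
  rcases titlePriority_cases x with hk | hk | hk | hk | hk | hk
  · rw [show pvBucketed l = pvBucket 1 l ++
        (pvBucket 2 l ++ pvBucket 3 l ++ pvBucket 4 l ++ pvBucket 5 l ++ pvBucket 6 l) by
          simp [pvBucketed, List.append_assoc]]
    rw [insertBy_split _ _ _ _ (fun y hy => hfalse _ hk 1 (by norm_num) y hy)
      (by intro y hy
          simp only [List.append_assoc, List.mem_append] at hy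
          rcases hy with h | h | h | h | h
          exacts [htrue _ hk 2 (by norm_num) y h, htrue _ hk 3 (by norm_num) y h,
                  htrue _ hk 4 (by norm_num) y h, htrue _ hk 5 (by norm_num) y h,
                  htrue _ hk 6 (by norm_num) y h])]
    simp [pvBucketed, hbk, hk, List.append_assoc]
  · rw [show pvBucketed l = (pvBucket 1 l ++ pvBucket 2 l) ++
        (pvBucket 3 l ++ pvBucket 4 l ++ pvBucket 5 l ++ pvBucket 6 l) by
          simp [pvBucketed, List.append_assoc]]
    rw [insertBy_split _ _ _ _
      (by intro y hy
          simp only [List.mem_append] at hy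
          rcases hy with h | h
          exacts [hfalse _ hk 1 (by norm_num) y h, hfalse _ hk 2 (by norm_num) y h])
      (by intro y hy
          simp only [List.append_assoc, List.mem_append] at hy
          rcases hy with h | h | h | h
          exacts [htrue _ hk 3 (by norm_num) y h, htrue _ hk 4 (by norm_num) y h,
                  htrue _ hk 5 (by norm_num) y h, htrue _ hk 6 (by norm_num) y h])]
    simp [pvBucketed, hbk, hk, List.append_assoc]
  · rw [show pvBucketed l = (pvBucket 1 l ++ pvBucket 2 l ++ pvBucket 3 l) ++
        (pvBucket 4 l ++ pvBucket 5 l ++ pvBucket 6 l) by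
          simp [pvBucketed, List.append_assoc]]
    rw [insertBy_split _ _ _ _
      (by intro y hy
          simp only [List.append_assoc, List.mem_append] at hy
          rcases hy with h | h | h
          exacts [hfalse _ hk 1 (by norm_num) y h, hfalse _ hk 2 (by norm_num) y h,
                  hfalse _ hk 3 (by norm_num) y h])
      (by intro y hy
          simp only [List.append_assoc, List.mem_append] at hy
          rcases hy with h | h | h
          exacts [htrue _ hk 4 (by norm_num) y h, htrue _ hk 5 (by norm_num) y h,
                  htrue _ hk 6 (by norm_num) y h])]
    simp [pvBucketed, hbk, hk, List.append_assoc]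
  · rw [show pvBucketed l = (pvBucket 1 l ++ pvBucket 2 l ++ pvBucket 3 l ++ pvBucket 4 l) ++
        (pvBucket 5 l ++ pvBucket 6 l) by
          simp [pvBucketed, List.append_assoc]]
    rw [insertBy_split _ _ _ _
      (by intro y hy
          simp only [List.append_assoc, List.mem_append] at hy
          rcases hy with h | h | h | h
          exacts [hfalse _ hk 1 (by norm_num) y h, hfalse _ hk 2 (by norm_num) y h,
                  hfalse _ hk 3 (by norm_num) y h, hfalse _ hk 4 (by norm_num) y h])
      (by intro y hy
          simp only [List.mem_append] at hy
          rcases hy with h | h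
          exacts [htrue _ hk 5 (by norm_num) y h, htrue _ hk 6 (by norm_num) y h])]
    simp [pvBucketed, hbk, hk, List.append_assoc]
  · rw [show pvBucketed l = (pvBucket 1 l ++ pvBucket 2 l ++ pvBucket 3 l ++ pvBucket 4 l ++
        pvBucket 5 l) ++ (pvBucket 6 l) by simp [pvBucketed, List.append_assoc]]
    rw [insertBy_split _ _ _ _
      (by intro y hy
          simp only [List.append_assoc, List.mem_append] at hy
          rcases hy with h | h | h | h | h
          exacts [hfalse _ hk 1 (by norm_num) y h, hfalse _ hk 2 (by norm_num) y h,
                  hfalse _ hk 3 (by norm_num) y h, hfalse _ hk 4 (by norm_num) y h,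
                  hfalse _ hk 5 (by norm_num) y h])
      (fun y hy => htrue _ hk 6 (by norm_num) y hy)]
    simp [pvBucketed, hbk, hk, List.append_assoc]
  · rw [show pvBucketed l = (pvBucket 1 l ++ pvBucket 2 l ++ pvBucket 3 l ++ pvBucket 4 l ++
        pvBucket 5 l ++ pvBucket 6 l) ++ ([] : List (List (String × String))) by
          simp [pvBucketed, List.append_assoc]]
    rw [insertBy_split _ _ _ _
      (by intro y hy
          simp only [List.append_assoc, List.mem_append] at hy
          rcases hy with h | h | h | h | h | h
          exacts [hfalse _ hk 1 (by norm_num) y h, hfalse _ hk 2 (by norm_num) y h,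
                  hfalse _ hk 3 (by norm_num) y h, hfalse _ hk 4 (by norm_num) y h,
                  hfalse _ hk 5 (by norm_num) y h, hfalse _ hk 6 (by norm_num) y h])
      (by intro y hy; cases hy)]
    simp [pvBucketed, hbk, hk, List.append_assoc]

theorem foldl_insertBy_eq_bucketed (l : List (List (String × String))) :
    l.foldl (fun acc x => PySem.List.insertBy (fun a b => decide (titlePriority a < titlePriority b)) x acc) []
      = pvBucketed l := by
  induction l using List.reverseRecOn with
  | nil => simp [pvBucketed, pvBucket]
  | append_singleton t x ih =>
    rw [List.foldl_append]
    simp only [List.foldl_cons, List.foldl_nil]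
    rw [ih, insertBy_bucketed]

theorem sorted_eq_bucketed (l : List (List (String × String))) :
    PySem.List.sorted l titlePriority false = pvBucketed l := by
  rw [PySem.List.sorted_eq_foldl_insertBy]
  exact foldl_insertBy_eq_bucketed l

set_option maxHeartbeats 2000000 in
theorem pvBucketStep_foldl (l : List (List (String × String)))
    (b1 b2 b3 b4 b5 b6 : List (List (String × String))) :
    l.foldl pvBucketStep (b1, b2, b3, b4, b5, b6) =
      (b1 ++ pvBucket 1 (l.filter pvKeep), b2 ++ pvBucket 2 (l.filter pvKeep),
       b3 ++ pvBucket 3 (l.filter pvKeep), b4 ++ pvBucket 4 (l.filter pvKeep),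
       b5 ++ pvBucket 5 (l.filter pvKeep), b6 ++ pvBucket 6 (l.filter pvKeep)) := by
  induction l generalizing b1 b2 b3 b4 b5 b6 with
  | nil => simp [pvBucket]
  | cons p t ih =>
    rw [List.foldl_cons, ih]
    by_cases hkeep : pvKeep p
    · have hkeep' : (pvKeyTitles.any fun kt => PySem.Str.isIn kt (pvTitle p)) = true := hkeep
      simp only [pvBucketStep, hkeep', Bool.not_true, Bool.false_eq_true, if_false]
      split_ifs with h1 h2 h3 h4 h5
      · have hp : titlePriority p = 1 := by
          unfold titlePriority; dsimp only; rw [if_pos h1]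
        simp [pvBucket, hkeep, hp, List.append_assoc]
      · have hp : titlePriority p = 2 := by
          unfold titlePriority; dsimp only; rw [if_neg h1, if_pos h2]
        simp [pvBucket, hkeep, hp, List.append_assoc]
      · have hp : titlePriority p = 3 := by
          unfold titlePriority; dsimp only; rw [if_neg h1, if_neg h2, if_pos h3]
        simp [pvBucket, hkeep, hp, List.append_assoc]
      · have hp : titlePriority p = 4 := by
          unfold titlePriority; dsimp only; rw [if_neg h1, if_neg h2, if_neg h3, if_pos h4]
        simp [pvBucket, hkeep, hp, List.append_assoc]
      · have hp : titlePriority p = 5 := by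
          unfold titlePriority; dsimp only; rw [if_neg h1, if_neg h2, if_neg h3, if_neg h4, if_pos h5]
        simp [pvBucket, hkeep, hp, List.append_assoc]
      · have hp : titlePriority p = 6 := by
          unfold titlePriority; dsimp only
          rw [if_neg h1, if_neg h2, if_neg h3, if_neg h4, if_neg h5]
        simp [pvBucket, hkeep, hp, List.append_assoc]
    · have hkeepb : pvKeep p = false := by simpa using hkeep
      have hskip : (!(pvKeyTitles.any fun kt => PySem.Str.isIn kt (pvTitle p))) = true := by
        rw [show (pvKeyTitles.any fun kt => PySem.Str.isIn kt (pvTitle p)) = false from hkeepb]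
        rfl
      have hstep : pvBucketStep (b1, b2, b3, b4, b5, b6) p = (b1, b2, b3, b4, b5, b6) := by
        unfold pvBucketStep; dsimp only; rw [if_pos hskip]
      rw [hstep]
      simp [pvBucket, hkeepb]

theorem filter_eq_foldl (l : List (List (String × String))) :
    l.foldl (fun acc profile => if pvKeep profile then acc ++ [profile] else acc) [] = l.filter pvKeep := by
  simpa using PySem.List.foldl_append_if_eq_filter pvKeep l ([])

-- ===== VERDICT (by name: the statement is the Claim_ definition above) =====
theorem filter_key_people_py_spec : Claim_equal_filter_key_people_py := by
  intro profiles _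
  unfold Spec_filter_key_people_py filter_key_people_py filter_key_people_py_alt
  rw [filter_eq_foldl, sorted_eq_bucketed, pvBucketStep_foldl]
  simp [pvBucketed]
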